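-- pv_equiv track=rewrite | github.com/981377660LMT/algorithm-study | 11_动态规划/dp分类/线性dp/CF56E-Domino Principles.py | cf56E
-- ===== SOURCE A (Python) =====
-- from typing import List, Tuple
--
-- def cf56E(dominos: List[Tuple[int, int]]) -> List[int]:
--     n = len(dominos)
--     dominoWithId = [(x, h, i) for i, (x, h) in enumerate(dominos)]
--     dominoWithId.sort(key=lambda x: x[0])
--     res = [1] * n
--     maxRight = [-1] * n  # 排序后的第 i 块骨牌压不倒的第一块骨牌的位置
--     for i in range(n - 2, -1, -1):
--         right = i + 1
--         while right != -1 and dominoWithId[i][0] + dominoWithId[i][1] > dominoWithId[right][0]: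
--             res[dominoWithId[i][2]] += res[dominoWithId[right][2]]
--             right = maxRight[right]
--         maxRight[i] = right
--     return res
-- ===== SOURCE B (Python) =====
-- from typing import List, Tuple
--
-- def cf56E(dominos: List[Tuple[int, int]]) -> List[int]:
--     n = len(dominos)
--     ds = sorted(((x, h, i) for i, (x, h) in enumerate(dominos)), key=lambda t: t[0])
--     res = [1] * n
--     for k, (x, h, i) in enumerate(ds):
--         reach = x + h
--         cnt = 1
--         for x2, h2, _ in ds[k + 1:]:
--             if x2 >= reach:
--                 break
--             cnt += 1
--             if x2 + h2 > reach:
--                 reach = x2 + h2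
--         res[i] = cnt
--     return res
-- ===== Notes on version B (the rewrite author's own statement) =====
-- stated objective: simpler
-- what changed: A runs a right-to-left DP over the sorted dominoes, sharing a maxRight jump-pointer array and accumulating each answer as a sum of previously computed block counts; B drops all cross-domino state and instead simulates each push independently: a plain forward scan from the domino's sorted position that maintains the running maximum reach and counts dominoes until the first survivor.
import Mathlib
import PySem

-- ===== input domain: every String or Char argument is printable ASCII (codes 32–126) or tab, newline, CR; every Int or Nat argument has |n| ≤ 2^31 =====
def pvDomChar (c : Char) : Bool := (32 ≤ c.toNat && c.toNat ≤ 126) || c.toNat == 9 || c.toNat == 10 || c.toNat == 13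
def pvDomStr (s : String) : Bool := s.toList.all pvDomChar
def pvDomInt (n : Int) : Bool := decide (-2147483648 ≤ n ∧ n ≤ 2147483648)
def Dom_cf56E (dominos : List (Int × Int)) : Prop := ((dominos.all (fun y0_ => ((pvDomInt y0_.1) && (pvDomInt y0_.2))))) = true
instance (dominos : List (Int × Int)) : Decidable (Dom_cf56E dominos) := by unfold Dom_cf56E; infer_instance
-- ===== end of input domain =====

-- B drops A's shared right-to-left DP state (maxRight jump pointers + count accumulation) and
-- simulates each push independently by a forward scan with a running maximum reach (objective: simpler).

-- ===== PORT A =====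
-- list get / set at an Int index (always called with 0 ≤ i < length here, where they agree with Python)
def pvGetI (l : List Int) (i : Int) : Int := PySem.List.pyGetD l i 0
def pvSetI (l : List Int) (i : Int) (v : Int) : List Int := PySem.List.pySetD l i v
def pvGetT (l : List (Int × Int × Int)) (i : Int) : Int × Int × Int := PySem.List.pyGetD l i (0, 0, 0)

-- inner 'while right != -1 and d[i][0]+d[i][1] > d[right][0]' loop of A; fuel bounds the number of
-- iterations (the port runs it with fuel n+1, never exhausted: 'right' strictly increases along
-- maxRight links)
def cf56E_while (d : List (Int × Int × Int)) (i : Int) :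
    Nat → List Int → List Int → Int → List Int × Int
  | 0, res, _, right => (res, right)
  | fuel + 1, res, mr, right =>
    if right ≠ -1 ∧ (pvGetT d i).1 + (pvGetT d i).2.1 > (pvGetT d right).1 then
      cf56E_while d i fuel
        (pvSetI res (pvGetT d i).2.2
          (pvGetI res (pvGetT d i).2.2 + pvGetI res (pvGetT d right).2.2))
        mr (pvGetI mr right)
    else (res, right)

-- one iteration of A's outer 'for i in range(n-2, -1, -1)' loop on the state (res, maxRight)
def cf56E_stepA (d : List (Int × Int × Int)) (fuel : Nat)
    (st : List Int × List Int) (i : Int) : List Int × List Int :=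
  let p := cf56E_while d i fuel st.1 st.2 (i + 1)
  (p.1, pvSetI st.2 i p.2)

def cf56E (dominos : List (Int × Int)) : List Int :=
  let n := dominos.length
  let dominoWithId := PySem.List.sorted
      ((PySem.List.enumerate dominos).map (fun p => (p.2.1, p.2.2, p.1))) (fun t => t.1)
  ((PySem.List.pyRange ((n : Int) - 2) (-1) (-1)).foldl
      (cf56E_stepA dominoWithId (n + 1)) (List.replicate n 1, List.replicate n (-1))).1

-- ===== PORT B =====
-- B's inner 'for x2, h2, _ in ds[k+1:]: if x2 >= reach: break; cnt += 1; if x2+h2 > reach: reach = x2+h2'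
def cf56E_bScan : List (Int × Int × Int) → Int → Int → Int
  | [], _, cnt => cnt
  | (x2, h2, _) :: rest, reach, cnt =>
    if x2 ≥ reach then cnt
    else cf56E_bScan rest (if x2 + h2 > reach then x2 + h2 else reach) (cnt + 1)

-- B's outer 'for k, (x, h, i) in enumerate(ds): … res[i] = cnt'
def cf56E_stepB (ds : List (Int × Int × Int)) (res : List Int)
    (p : Int × Int × Int × Int) : List Int :=
  pvSetI res p.2.2.2
    (cf56E_bScan (PySem.List.slice ds (some (p.1 + 1)) none) (p.2.1 + p.2.2.1) 1)

def cf56E_alt (dominos : List (Int × Int)) : List Int :=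
  let ds := PySem.List.sorted
      ((PySem.List.enumerate dominos).map (fun p => (p.2.1, p.2.2, p.1))) (fun t => t.1)
  (PySem.List.enumerate ds).foldl (cf56E_stepB ds) (List.replicate dominos.length 1)

-- ===== PRECONDITION & SPEC =====
def Spec_cf56E (dominos : List (Int × Int)) (out : List Int) : Prop := out = cf56E_alt dominos
instance (dominos : List (Int × Int)) (out : List Int) : Decidable (Spec_cf56E dominos out) := by unfold Spec_cf56E; infer_instance

-- ===== CLAIM (what is proved, stated in full; the proofs are below) =====
def Claim_equal_cf56E : Prop := ∀ (dominos : List (Int × Int)), Dom_cf56E dominos → Spec_cf56E dominos (cf56E dominos)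

-- ===== LEMMAS AND PROOFS =====

-- the direct forward scan from position j with current reach r: number of dominoes toppled
def cntS (d : List (Int × Int × Int)) (j : Nat) (r : Int) : Int :=
  if h : j < d.length then
    if (d[j]'h).1 < r then cntS d (j + 1) (max r ((d[j]'h).1 + (d[j]'h).2.1)) + 1 else 0
  else 0
termination_by d.length - j

-- the position where that scan stops (d.length if it runs off the end)
def stopS (d : List (Int × Int × Int)) (j : Nat) (r : Int) : Nat :=
  if h : j < d.length then
    if (d[j]'h).1 < r then stopS d (j + 1) (max r ((d[j]'h).1 + (d[j]'h).2.1)) else j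
  else j
termination_by d.length - j

-- count/stop of the block toppled by pushing the domino at sorted position k
def blockCnt (d : List (Int × Int × Int)) (k : Nat) (hk : k < d.length) : Int :=
  cntS d (k + 1) ((d[k]'hk).1 + (d[k]'hk).2.1) + 1
def blockStop (d : List (Int × Int × Int)) (k : Nat) (hk : k < d.length) : Nat :=
  stopS d (k + 1) ((d[k]'hk).1 + (d[k]'hk).2.1)

-- A's encoding of a stop position as the 'right' value at loop exit
def intStop (n m : Nat) : Int := if m = n then -1 else (m : Int)

theorem pvGetI_eq (l : List Int) (i : Int) (h0 : 0 ≤ i) (h1 : i < (l.length : Int)) :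
    pvGetI l i = l[i.toNat]'(by omega) := by
  simp [pvGetI, PySem.List.pyGetD_eq_getElem l 0 h0 h1]

theorem pvSetI_eq (l : List Int) (i : Int) (v : Int) (h0 : 0 ≤ i) :
    pvSetI l i v = l.set i.toNat v := by
  simp [pvSetI, PySem.List.pySetD_of_nonneg _ _ h0]

theorem pvGetT_eq (l : List (Int × Int × Int)) (i : Int) (h0 : 0 ≤ i) (h1 : i < (l.length : Int)) :
    pvGetT l i = l[i.toNat]'(by omega) := by
  simp [pvGetT, PySem.List.pyGetD_eq_getElem l _ h0 h1]

theorem length_pvSetI (l : List Int) (i v : Int) : (pvSetI l i v).length = l.length := by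
  simp [pvSetI, PySem.List.length_pySetD]

theorem pvGetI_pvSetI_self (l : List Int) (i v : Int) (h0 : 0 ≤ i) (h1 : i < (l.length : Int)) :
    pvGetI (pvSetI l i v) i = v := by
  rw [pvSetI_eq l i v h0, pvGetI_eq _ i h0 (by simpa using h1)]
  simp

theorem pvGetI_pvSetI_ne (l : List Int) (i j v : Int) (h0 : 0 ≤ i) (hj : 0 ≤ j)
    (hne : i ≠ j) : pvGetI (pvSetI l j v) i = pvGetI l i := by
  rw [pvSetI_eq l j v hj]
  by_cases hi : i < (l.length : Int)
  · rw [pvGetI_eq _ i h0 (by simpa using hi), pvGetI_eq l i h0 hi]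
    rw [List.getElem_set]
    have : j.toNat ≠ i.toNat := by omega
    simp [this]
  · unfold pvGetI
    rw [PySem.List.pyGetD_of_none, PySem.List.pyGetD_of_none] <;>
      simp [PySem.List.pyGet?_eq_none_iff, PySem.Raise.InRange] <;> omega

theorem pvSetI_pvSetI_self (l : List Int) (i a b : Int) (h0 : 0 ≤ i) :
    pvSetI (pvSetI l i a) i b = pvSetI l i b := by
  rw [pvSetI_eq _ _ _ h0, pvSetI_eq _ _ _ h0, pvSetI_eq _ _ _ h0, List.set_set]

theorem pvSetI_pvGetI_self (l : List Int) (i : Int) (h0 : 0 ≤ i) (h1 : i < (l.length : Int)) :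
    pvSetI l i (pvGetI l i) = l := by
  rw [pvGetI_eq l i h0 h1, pvSetI_eq l i _ h0]
  apply List.ext_getElem (by simp)
  intro k h h'
  rw [List.getElem_set]
  split <;> simp_all

theorem getElem_eq_pvGetI (l : List Int) (a : Nat) (h : a < l.length) :
    l[a]'h = pvGetI l (a : Int) := by
  rw [pvGetI_eq l (a : Int) (by omega) (by exact_mod_cast h)]
  simp

theorem pvGetI_replicate (n : Nat) (c i : Int) (h0 : 0 ≤ i) (h1 : i < (n : Int)) :
    pvGetI (List.replicate n c) i = c := by
  rw [pvGetI_eq _ i h0 (by simpa using h1)]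
  simp

theorem cntS_of_ge (d : List (Int × Int × Int)) (j : Nat) (r : Int) (h : d.length ≤ j) :
    cntS d j r = 0 := by
  unfold cntS
  rw [dif_neg (by omega)]

theorem stopS_of_ge (d : List (Int × Int × Int)) (j : Nat) (r : Int) (h : d.length ≤ j) :
    stopS d j r = j := by
  unfold stopS
  rw [dif_neg (by omega)]

theorem cntS_step (d : List (Int × Int × Int)) (j : Nat) (r : Int) (h : j < d.length)
    (hc : (d[j]'h).1 < r) :
    cntS d j r = cntS d (j + 1) (max r ((d[j]'h).1 + (d[j]'h).2.1)) + 1 := by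
  conv_lhs => rw [cntS]
  rw [dif_pos h, if_pos hc]

theorem cntS_stop (d : List (Int × Int × Int)) (j : Nat) (r : Int) (h : j < d.length)
    (hc : ¬ (d[j]'h).1 < r) : cntS d j r = 0 := by
  conv_lhs => rw [cntS]
  rw [dif_pos h, if_neg hc]

theorem stopS_step (d : List (Int × Int × Int)) (j : Nat) (r : Int) (h : j < d.length)
    (hc : (d[j]'h).1 < r) :
    stopS d j r = stopS d (j + 1) (max r ((d[j]'h).1 + (d[j]'h).2.1)) := by
  conv_lhs => rw [stopS]
  rw [dif_pos h, if_pos hc]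

theorem stopS_stop (d : List (Int × Int × Int)) (j : Nat) (r : Int) (h : j < d.length)
    (hc : ¬ (d[j]'h).1 < r) : stopS d j r = j := by
  conv_lhs => rw [stopS]
  rw [dif_pos h, if_neg hc]

theorem stopS_ge (d : List (Int × Int × Int)) : ∀ (j : Nat) (r : Int), j ≤ stopS d j r := by
  intro j
  induction hm : d.length - j using Nat.strong_induction_on generalizing j with
  | _ m ih =>
    intro r
    by_cases h : j < d.length
    · by_cases hc : (d[j]'h).1 < r
      · rw [stopS_step d j r h hc]
        have := ih (d.length - (j + 1)) (by omega) (j + 1) rfl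
          (max r ((d[j]'h).1 + (d[j]'h).2.1))
        omega
      · rw [stopS_stop d j r h hc]
    · rw [stopS_of_ge d j r (by omega)]

theorem stopS_le (d : List (Int × Int × Int)) : ∀ (j : Nat) (r : Int), j ≤ d.length →
    stopS d j r ≤ d.length := by
  intro j
  induction hm : d.length - j using Nat.strong_induction_on generalizing j with
  | _ m ih =>
    intro r hj
    by_cases h : j < d.length
    · by_cases hc : (d[j]'h).1 < r
      · rw [stopS_step d j r h hc]
        exact ih (d.length - (j + 1)) (by omega) (j + 1) rfl _ (by omega)
      · rw [stopS_stop d j r h hc]; omega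
    · rw [stopS_of_ge d j r (by omega)]; exact hj

-- a reach component that is already dominated by the next x never matters (uses sortedness)
theorem scan_irrel (d : List (Int × Int × Int))
    (hmono : ∀ (a b : Nat) (ha : a < d.length) (hb : b < d.length), a ≤ b →
      (d[a]'ha).1 ≤ (d[b]'hb).1) :
    ∀ (t : Nat) (F r : Int), (∀ (ht : t < d.length), F ≤ (d[t]'ht).1) →
      cntS d t (max r F) = cntS d t r ∧ stopS d t (max r F) = stopS d t r := by
  intro t
  induction hm : d.length - t using Nat.strong_induction_on generalizing t with
  | _ m ih =>
    intro F r hF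
    by_cases ht : t < d.length
    · have hFx := hF ht
      by_cases hc : (d[t]'ht).1 < r
      · have hc' : (d[t]'ht).1 < max r F := by omega
        have hnext : ∀ (ht' : t + 1 < d.length),
            F ≤ (d[t+1]'ht').1 := fun ht' => le_trans hFx (hmono t (t+1) ht ht' (by omega))
        have hmax : max (max r F) ((d[t]'ht).1 + (d[t]'ht).2.1)
            = max (max r ((d[t]'ht).1 + (d[t]'ht).2.1)) F := by omega
        have hIH := ih (d.length - (t + 1)) (by omega) (t + 1) rfl F
          (max r ((d[t]'ht).1 + (d[t]'ht).2.1)) hnext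
        constructor
        · rw [cntS_step d t _ ht hc', cntS_step d t r ht hc, hmax, hIH.1]
        · rw [stopS_step d t _ ht hc', stopS_step d t r ht hc, hmax, hIH.2]
      · have hc' : ¬ (d[t]'ht).1 < max r F := by omega
        constructor
        · rw [cntS_stop d t _ ht hc', cntS_stop d t r ht hc]
        · rw [stopS_stop d t _ ht hc', stopS_stop d t r ht hc]
    · constructor
      · rw [cntS_of_ge d t _ (by omega), cntS_of_ge d t _ (by omega)]
      · rw [stopS_of_ge d t _ (by omega), stopS_of_ge d t _ (by omega)]

-- the merge law: a scan with reach max r F splits into the block scan with reach F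
-- followed by a scan with reach r from the block's stop
theorem scan_merge (d : List (Int × Int × Int))
    (hmono : ∀ (a b : Nat) (ha : a < d.length) (hb : b < d.length), a ≤ b →
      (d[a]'ha).1 ≤ (d[b]'hb).1) :
    ∀ (t : Nat) (F r : Int),
      cntS d t (max r F) = cntS d t F + cntS d (stopS d t F) r ∧
      stopS d t (max r F) = stopS d (stopS d t F) r := by
  intro t
  induction hm : d.length - t using Nat.strong_induction_on generalizing t with
  | _ m ih =>
    intro F r
    by_cases ht : t < d.length
    · by_cases hc : (d[t]'ht).1 < F
      · have hc' : (d[t]'ht).1 < max r F := by omega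
        have hmax : max (max r F) ((d[t]'ht).1 + (d[t]'ht).2.1)
            = max r (max F ((d[t]'ht).1 + (d[t]'ht).2.1)) := by omega
        have hIH := ih (d.length - (t + 1)) (by omega) (t + 1) rfl
          (max F ((d[t]'ht).1 + (d[t]'ht).2.1)) r
        constructor
        · rw [cntS_step d t _ ht hc', hmax, hIH.1, cntS_step d t F ht hc,
            stopS_step d t F ht hc]
          ring
        · rw [stopS_step d t _ ht hc', hmax, hIH.2, stopS_step d t F ht hc]
      · have hstop : stopS d t F = t := stopS_stop d t F ht hc
        have hcnt : cntS d t F = 0 := cntS_stop d t F ht hc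
        have hirr := scan_irrel d hmono t F r (fun _ => by omega)
        rw [hstop, hcnt, hirr.1, hirr.2]
        exact ⟨by ring, rfl⟩
    · have h1 : stopS d t F = t := stopS_of_ge d t _ (by omega)
      rw [h1, cntS_of_ge d t _ (by omega), cntS_of_ge d t _ (by omega), cntS_of_ge d t _ (by omega),
        stopS_of_ge d t _ (by omega), stopS_of_ge d t _ (by omega)]
      exact ⟨by ring, rfl⟩

-- B's inner loop over a suffix computes the direct scan count
theorem bScan_eq (d : List (Int × Int × Int)) :
    ∀ (j : Nat) (r c : Int), cf56E_bScan (d.drop j) r c = c + cntS d j r := by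
  intro j
  induction hm : d.length - j using Nat.strong_induction_on generalizing j with
  | _ m ih =>
    intro r c
    by_cases hj : j < d.length
    · rw [List.drop_eq_getElem_cons hj]
      by_cases hc : (d[j]'hj).1 < r
      · rw [cntS_step d j r hj hc]
        have hif : (if (d[j]'hj).1 + (d[j]'hj).2.1 > r then (d[j]'hj).1 + (d[j]'hj).2.1 else r)
            = max r ((d[j]'hj).1 + (d[j]'hj).2.1) := by
          split <;> omega
        show cf56E_bScan ((d[j]'hj) :: d.drop (j+1)) r c = _
        rw [show (d[j]'hj) = ((d[j]'hj).1, (d[j]'hj).2.1, (d[j]'hj).2.2) from rfl]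
        rw [cf56E_bScan, if_neg (by omega), hif,
          ih (d.length - (j + 1)) (by omega) (j + 1) rfl _ (c + 1)]
        ring
      · rw [cntS_stop d j r hj hc]
        show cf56E_bScan ((d[j]'hj) :: d.drop (j+1)) r c = _
        rw [show (d[j]'hj) = ((d[j]'hj).1, (d[j]'hj).2.1, (d[j]'hj).2.2) from rfl]
        rw [cf56E_bScan, if_pos (by omega)]
        ring
    · rw [List.drop_eq_nil_of_le (by omega), cntS_of_ge d j r (by omega)]
      simp [cf56E_bScan]

-- A's inner while loop computes the direct scan, jumping block by block
theorem while_eq (d : List (Int × Int × Int)) (res mr : List Int) (i : Nat) (hi : i < d.length)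
    (hres : res.length = d.length)
    (hmono : ∀ (a b : Nat) (ha : a < d.length) (hb : b < d.length), a ≤ b →
      (d[a]'ha).1 ≤ (d[b]'hb).1)
    (hid : ∀ (a b : Nat) (ha : a < d.length) (hb : b < d.length), a ≠ b →
      (d[a]'ha).2.2 ≠ (d[b]'hb).2.2)
    (hidrange : ∀ (a : Nat) (ha : a < d.length),
      0 ≤ (d[a]'ha).2.2 ∧ (d[a]'ha).2.2 < (d.length : Int))
    (hInvRes : ∀ (k : Nat) (hk : k < d.length), i < k →
      pvGetI res (d[k]'hk).2.2 = blockCnt d k hk)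
    (hInvMr : ∀ (k : Nat) (hk : k < d.length), i < k →
      pvGetI mr (k : Int) = intStop d.length (blockStop d k hk)) :
    ∀ (fuel t : Nat) (c : Int), i < t → t ≤ d.length → d.length - t < fuel →
      cf56E_while d (i : Int) fuel (pvSetI res (d[i]'hi).2.2 c) mr (intStop d.length t)
        = (pvSetI res (d[i]'hi).2.2 (c + cntS d t ((d[i]'hi).1 + (d[i]'hi).2.1)),
           intStop d.length (stopS d t ((d[i]'hi).1 + (d[i]'hi).2.1))) := by
  intro fuel
  induction fuel with
  | zero => intro t c _ _ hf; omega
  | succ fl ih =>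
    intro t c hit htn hf
    have hTi : pvGetT d (i : Int) = d[i]'hi := by
      rw [pvGetT_eq d (i : Int) (by omega) (by exact_mod_cast hi)]; simp
    by_cases htlt : t < d.length
    · have hIS : intStop d.length t = (t : Int) := by unfold intStop; rw [if_neg (by omega)]
      have hTt : pvGetT d (t : Int) = d[t]'htlt := by
        rw [pvGetT_eq d (t : Int) (by omega) (by exact_mod_cast htlt)]; simp
      have hidI := hidrange i hi
      have hidT := hidrange t htlt
      have hne : (d[t]'htlt).2.2 ≠ (d[i]'hi).2.2 := hid t i htlt hi (by omega)
      by_cases hc : (d[t]'htlt).1 < (d[i]'hi).1 + (d[i]'hi).2.1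
      · -- loop body fires
        have hgetI : pvGetI (pvSetI res (d[i]'hi).2.2 c) (d[i]'hi).2.2 = c :=
          pvGetI_pvSetI_self res _ c hidI.1 (by rw [hres]; exact hidI.2)
        have hgetT : pvGetI (pvSetI res (d[i]'hi).2.2 c) (d[t]'htlt).2.2
            = blockCnt d t htlt := by
          rw [pvGetI_pvSetI_ne res _ _ c hidT.1 hidI.1 hne]
          exact hInvRes t htlt hit
        have hmr : pvGetI mr (t : Int) = intStop d.length (blockStop d t htlt) :=
          hInvMr t htlt hit
        rw [hIS, cf56E_while, if_pos ⟨by omega, by rw [hTi, hTt]; exact hc⟩]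
        rw [hTi, hTt, hgetI, hgetT, hmr, pvSetI_pvSetI_self res _ _ _ hidI.1]
        have hbs1 : t + 1 ≤ blockStop d t htlt := stopS_ge d (t + 1) _
        have hbs2 : blockStop d t htlt ≤ d.length := stopS_le d (t + 1) _ (by omega)
        rw [ih (blockStop d t htlt) (c + blockCnt d t htlt) (by omega) hbs2 (by omega)]
        have hmerge := scan_merge d hmono (t + 1) ((d[t]'htlt).1 + (d[t]'htlt).2.1)
          ((d[i]'hi).1 + (d[i]'hi).2.1)
        have hcnt : cntS d t ((d[i]'hi).1 + (d[i]'hi).2.1)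
            = blockCnt d t htlt + cntS d (blockStop d t htlt)
                ((d[i]'hi).1 + (d[i]'hi).2.1) := by
          rw [cntS_step d t _ htlt hc, hmerge.1]
          unfold blockCnt blockStop
          ring
        have hstop : stopS d t ((d[i]'hi).1 + (d[i]'hi).2.1)
            = stopS d (blockStop d t htlt) ((d[i]'hi).1 + (d[i]'hi).2.1) := by
          rw [stopS_step d t _ htlt hc, hmerge.2]
          rfl
        rw [hcnt, hstop, ← add_assoc]
      · -- loop exits here
        rw [hIS, cf56E_while, if_neg (by rw [hTi, hTt]; intro hcon; exact hc hcon.2)]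
        rw [cntS_stop d t _ htlt hc, stopS_stop d t _ htlt hc, hIS, add_zero]
    · -- t = d.length: right is -1, loop exits
      have ht : t = d.length := by omega
      have hIS : intStop d.length t = -1 := by unfold intStop; rw [if_pos ht]
      rw [hIS, cf56E_while, if_neg (by simp)]
      rw [cntS_of_ge d t _ (by omega), stopS_of_ge d t _ (by omega), hIS, add_zero]

-- A's outer loop, processed down from index i-1, fills every sorted position with its block count
theorem Aouter (d : List (Int × Int × Int))
    (hmono : ∀ (a b : Nat) (ha : a < d.length) (hb : b < d.length), a ≤ b →
      (d[a]'ha).1 ≤ (d[b]'hb).1)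
    (hid : ∀ (a b : Nat) (ha : a < d.length) (hb : b < d.length), a ≠ b →
      (d[a]'ha).2.2 ≠ (d[b]'hb).2.2)
    (hidrange : ∀ (a : Nat) (ha : a < d.length),
      0 ≤ (d[a]'ha).2.2 ∧ (d[a]'ha).2.2 < (d.length : Int)) :
    ∀ (i : Nat), i < d.length →
    ∀ (res mr : List Int), res.length = d.length → mr.length = d.length →
    (∀ (k : Nat) (hk : k < d.length), i ≤ k → pvGetI res (d[k]'hk).2.2 = blockCnt d k hk) →
    (∀ (k : Nat) (hk : k < d.length), i ≤ k →
      pvGetI mr (k : Int) = intStop d.length (blockStop d k hk)) →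
    (∀ (k : Nat) (hk : k < d.length), k < i → pvGetI res (d[k]'hk).2.2 = 1) →
    (((PySem.List.pyRange ((i : Int) - 1) (-1) (-1)).foldl
        (cf56E_stepA d (d.length + 1)) (res, mr)).1.length = d.length ∧
     ∀ (k : Nat) (hk : k < d.length),
       pvGetI ((PySem.List.pyRange ((i : Int) - 1) (-1) (-1)).foldl
         (cf56E_stepA d (d.length + 1)) (res, mr)).1 (d[k]'hk).2.2 = blockCnt d k hk) := by
  intro i
  induction i with
  | zero =>
    intro _ res mr hres hmr hInv1 _ _
    rw [PySem.List.pyRange_neg_one_eq_nil (by omega)]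
    exact ⟨hres, fun k hk => hInv1 k hk (by omega)⟩
  | succ m ihm =>
    intro hin res mr hres hmr hInv1 hInv2 hInv3
    have hm : m < d.length := by omega
    have hrange : PySem.List.pyRange (((m + 1 : Nat) : Int) - 1) (-1) (-1)
        = (m : Int) :: PySem.List.pyRange ((m : Int) - 1) (-1) (-1) := by
      have h1 : (((m + 1 : Nat) : Int) - 1) = (m : Int) := by push_cast; ring
      rw [h1, PySem.List.pyRange_neg_one_cons (by omega)]
    have hidM := hidrange m hm
    have hseed : res = pvSetI res (d[m]'hm).2.2 1 := by
      rw [← hInv3 m hm (by omega)]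
      exact (pvSetI_pvGetI_self res _ hidM.1 (by rw [hres]; exact hidM.2)).symm
    have hIS : intStop d.length (m + 1) = (m : Int) + 1 := by
      unfold intStop; rw [if_neg (by omega)]; push_cast; ring
    have hw := while_eq d res mr m hm hres hmono hid hidrange
      (fun k hk hmk => hInv1 k hk (by omega)) (fun k hk hmk => hInv2 k hk (by omega))
      (d.length + 1) (m + 1) 1 (by omega) (by omega) (by omega)
    rw [hIS] at hw
    have hbc : (1 : Int) + cntS d (m + 1) ((d[m]'hm).1 + (d[m]'hm).2.1) = blockCnt d m hm := by
      unfold blockCnt; ring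
    have hstep : cf56E_stepA d (d.length + 1) (res, mr) (m : Int)
        = (pvSetI res (d[m]'hm).2.2 (blockCnt d m hm),
           pvSetI mr (m : Int) (intStop d.length (blockStop d m hm))) := by
      unfold cf56E_stepA
      conv_lhs => rw [hseed]
      simp only [hw, hbc]
      rfl
    have hres' : (pvSetI res (d[m]'hm).2.2 (blockCnt d m hm)).length = d.length := by
      rw [length_pvSetI]; exact hres
    have hmr' : (pvSetI mr (m : Int) (intStop d.length (blockStop d m hm))).length = d.length := by
      rw [length_pvSetI]; exact hmr
    have hInv1' : ∀ (k : Nat) (hk : k < d.length), m ≤ k →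
        pvGetI (pvSetI res (d[m]'hm).2.2 (blockCnt d m hm)) (d[k]'hk).2.2 = blockCnt d k hk := by
      intro k hk hmk
      by_cases hkm : k = m
      · subst hkm
        exact pvGetI_pvSetI_self res _ _ hidM.1 (by rw [hres]; exact hidM.2)
      · rw [pvGetI_pvSetI_ne res _ _ _ (hidrange k hk).1 hidM.1 (hid k m hk hm hkm)]
        exact hInv1 k hk (by omega)
    have hInv2' : ∀ (k : Nat) (hk : k < d.length), m ≤ k →
        pvGetI (pvSetI mr (m : Int) (intStop d.length (blockStop d m hm))) (k : Int)
          = intStop d.length (blockStop d k hk) := by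
      intro k hk hmk
      by_cases hkm : k = m
      · subst hkm
        exact pvGetI_pvSetI_self mr _ _ (by omega) (by rw [hmr]; exact_mod_cast hk)
      · rw [pvGetI_pvSetI_ne mr _ _ _ (by omega) (by omega) (by exact_mod_cast hkm)]
        exact hInv2 k hk (by omega)
    have hInv3' : ∀ (k : Nat) (hk : k < d.length), k < m →
        pvGetI (pvSetI res (d[m]'hm).2.2 (blockCnt d m hm)) (d[k]'hk).2.2 = 1 := by
      intro k hk hkm
      rw [pvGetI_pvSetI_ne res _ _ _ (hidrange k hk).1 hidM.1 (hid k m hk hm (by omega))]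
      exact hInv3 k hk (by omega)
    have hrec := ihm hm _ _ hres' hmr' hInv1' hInv2' hInv3'
    rw [hrange]
    simp only [List.foldl_cons, hstep]
    exact hrec

-- B's outer loop from sorted position s onward
theorem Bfold (ds : List (Int × Int × Int))
    (hid : ∀ (a b : Nat) (ha : a < ds.length) (hb : b < ds.length), a ≠ b →
      (ds[a]'ha).2.2 ≠ (ds[b]'hb).2.2)
    (hidrange : ∀ (a : Nat) (ha : a < ds.length),
      0 ≤ (ds[a]'ha).2.2 ∧ (ds[a]'ha).2.2 < (ds.length : Int)) :
    ∀ (s : Nat) (res : List Int), res.length = ds.length →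
    (((PySem.List.enumerate (ds.drop s) (s : Int)).foldl (cf56E_stepB ds) res).length
        = ds.length ∧
     (∀ (k : Nat) (hk : k < ds.length), s ≤ k →
       pvGetI ((PySem.List.enumerate (ds.drop s) (s : Int)).foldl (cf56E_stepB ds) res)
         (ds[k]'hk).2.2 = blockCnt ds k hk) ∧
     (∀ (j : Int), 0 ≤ j → (∀ (k : Nat) (hk : k < ds.length), s ≤ k → (ds[k]'hk).2.2 ≠ j) →
       pvGetI ((PySem.List.enumerate (ds.drop s) (s : Int)).foldl (cf56E_stepB ds) res) j
         = pvGetI res j)) := by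
  intro s
  induction hm : ds.length - s using Nat.strong_induction_on generalizing s with
  | _ m ih =>
    intro res hres
    by_cases hs : s < ds.length
    · have hdrop : ds.drop s = (ds[s]'hs) :: ds.drop (s + 1) := List.drop_eq_getElem_cons hs
      have hidS := hidrange s hs
      have hslice : PySem.List.slice ds (some ((s : Int) + 1)) none = ds.drop (s + 1) := by
        rw [show ((s : Int) + 1) = ((s + 1 : Nat) : Int) from by push_cast; ring,
          PySem.List.slice_from_natCast]
      have hval : cf56E_bScan (PySem.List.slice ds (some ((s : Int) + 1)) none)
          ((ds[s]'hs).1 + (ds[s]'hs).2.1) 1 = blockCnt ds s hs := by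
        rw [hslice, bScan_eq ds (s + 1) _ 1]
        unfold blockCnt; ring
      have hstep : cf56E_stepB ds res ((s : Int), ds[s]'hs)
          = pvSetI res (ds[s]'hs).2.2 (blockCnt ds s hs) := by
        unfold cf56E_stepB
        rw [show (((s : Int), ds[s]'hs) : Int × Int × Int × Int).1 = (s : Int) from rfl]
        rw [hval]
      have hres1 : (pvSetI res (ds[s]'hs).2.2 (blockCnt ds s hs)).length = ds.length := by
        rw [length_pvSetI]; exact hres
      have hrec := ih (ds.length - (s + 1)) (by omega) (s + 1) rfl
        (pvSetI res (ds[s]'hs).2.2 (blockCnt ds s hs)) hres1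
      have hfold : (PySem.List.enumerate (ds.drop s) (s : Int)).foldl (cf56E_stepB ds) res
          = (PySem.List.enumerate (ds.drop (s + 1)) ((s + 1 : Nat) : Int)).foldl
              (cf56E_stepB ds) (pvSetI res (ds[s]'hs).2.2 (blockCnt ds s hs)) := by
        rw [hdrop, PySem.List.enumerate_cons, List.foldl_cons, hstep,
          show (s : Int) + 1 = ((s + 1 : Nat) : Int) from by push_cast; ring]
      refine ⟨by rw [hfold]; exact hrec.1, ?_, ?_⟩
      · intro k hk hsk
        rw [hfold]
        by_cases hks : k = s
        · subst hks
          rw [hrec.2.2 (ds[k]'hk).2.2 (hidrange k hk).1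
            (fun k' hk' hsk' => hid k' k hk' hk (by omega))]
          exact pvGetI_pvSetI_self res _ _ hidS.1 (by rw [hres]; exact hidS.2)
        · exact hrec.2.1 k hk (by omega)
      · intro j hj hjk
        rw [hfold, hrec.2.2 j hj (fun k' hk' hsk' => hjk k' hk' (by omega)),
          pvGetI_pvSetI_ne res j _ _ hj hidS.1 (fun he => hjk s hs (by omega) he.symm)]
    · rw [List.drop_eq_nil_of_le (by omega), PySem.List.enumerate_nil, List.foldl_nil]
      exact ⟨hres, fun k hk hsk => by omega, fun j _ _ => rfl⟩

-- the two ports agree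
theorem cf56E_eq (dominos : List (Int × Int)) : cf56E dominos = cf56E_alt dominos := by
  unfold cf56E cf56E_alt
  set d := PySem.List.sorted
      ((PySem.List.enumerate dominos).map (fun p => (p.2.1, p.2.2, p.1))) (fun t => t.1) with hd
  dsimp only
  have hlen : d.length = dominos.length := by
    rw [hd, PySem.List.length_sorted, List.length_map, PySem.List.length_enumerate]
  have hperm : (d.map (fun t => t.2.2)).Perm
      ((List.range dominos.length).map (fun (k : Nat) => (k : Int))) := by
    have h1 : d.Perm ((PySem.List.enumerate dominos).map (fun p => (p.2.1, p.2.2, p.1))) := by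
      rw [hd]; exact PySem.List.sorted_perm _ _ _
    have h2 := h1.map (fun t : Int × Int × Int => t.2.2)
    rw [List.map_map] at h2
    have h3 : ((PySem.List.enumerate dominos).map
        ((fun t : Int × Int × Int => t.2.2) ∘ (fun p : Int × (Int × Int) => (p.2.1, p.2.2, p.1))))
        = (PySem.List.enumerate dominos).map (fun p => p.1) := by
      apply List.map_congr_left; intro p _; rfl
    rw [h3, PySem.List.map_fst_enumerate] at h2
    rwa [zero_add, PySem.List.pyRange_zero_nat] at h2
  have hnodup : (d.map (fun t => t.2.2)).Nodup := by
    rw [hperm.nodup_iff]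
    exact List.Nodup.map (fun a b h => by exact_mod_cast h) (List.nodup_range)
  have hid : ∀ (a b : Nat) (ha : a < d.length) (hb : b < d.length), a ≠ b →
      (d[a]'ha).2.2 ≠ (d[b]'hb).2.2 := by
    intro a b ha hb hne h
    have h1 : (d.map (fun t => t.2.2))[a]'(by simpa using ha)
        = (d.map (fun t => t.2.2))[b]'(by simpa using hb) := by
      simpa using h
    exact hne (hnodup.getElem_inj_iff.1 h1)
  have hidrange : ∀ (a : Nat) (ha : a < d.length),
      0 ≤ (d[a]'ha).2.2 ∧ (d[a]'ha).2.2 < (d.length : Int) := by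
    intro a ha
    have hmem : (d[a]'ha).2.2 ∈ d.map (fun t => t.2.2) :=
      List.mem_map_of_mem (List.getElem_mem ha)
    rw [hperm.mem_iff] at hmem
    simp only [List.mem_map, List.mem_range] at hmem
    obtain ⟨k, hk, hkeq⟩ := hmem
    rw [hlen]
    omega
  have hmono : ∀ (a b : Nat) (ha : a < d.length) (hb : b < d.length), a ≤ b →
      (d[a]'ha).1 ≤ (d[b]'hb).1 := by
    have hpw : d.Pairwise (fun a b => a.1 ≤ b.1) := by
      rw [hd]; exact PySem.List.sorted_pairwise _ _
    rw [List.pairwise_iff_getElem] at hpw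
    intro a b ha hb hab
    rcases Nat.lt_or_ge a b with hlt | hge
    · exact hpw a b ha hb hlt
    · have : a = b := by omega
      subst this; exact le_refl _
  have hsurj : ∀ (a : Nat), a < d.length → ∃ (k : Nat) (hk : k < d.length),
      (d[k]'hk).2.2 = (a : Int) := by
    intro a ha
    have hmem : ((a : Int)) ∈ (List.range dominos.length).map (fun (k : Nat) => (k : Int)) := by
      simp only [List.mem_map, List.mem_range]
      exact ⟨a, by omega, rfl⟩
    rw [← hperm.mem_iff] at hmem
    rw [List.mem_iff_getElem] at hmem
    obtain ⟨k, hk, hkeq⟩ := hmem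
    rw [List.getElem_map] at hkeq
    exact ⟨k, by simpa using hk, hkeq⟩
  -- B's side
  have hB := Bfold d hid hidrange 0 (List.replicate dominos.length 1) (by simp [hlen])
  rw [List.drop_zero, Nat.cast_zero] at hB
  -- A's side
  cases hn : dominos.length with
  | zero =>
    have hdn : d = [] := List.eq_nil_of_length_eq_zero (by rw [hlen, hn])
    rw [hdn] at hB ⊢
    have hr : PySem.List.pyRange (((0 : Nat) : Int) - 2) (-1) (-1) = [] :=
      PySem.List.pyRange_neg_one_eq_nil (by norm_num)
    simp only [Nat.cast_zero] at hr ⊢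
    rw [hr]
    simp [PySem.List.enumerate_nil]
  | succ n0 =>
    rw [← hn]
    have hn1 : d.length - 1 < d.length := by omega
    have hInv1 : ∀ (k : Nat) (hk : k < d.length), d.length - 1 ≤ k →
        pvGetI (List.replicate dominos.length 1) (d[k]'hk).2.2 = blockCnt d k hk := by
      intro k hk hle
      have hkeq : k = d.length - 1 := by omega
      have hbc : blockCnt d k hk = 1 := by
        unfold blockCnt
        rw [cntS_of_ge d (k + 1) _ (by omega)]
        omega
      rw [hbc]
      exact pvGetI_replicate _ _ _ (hidrange k hk).1
        (by rw [← hlen]; exact (hidrange k hk).2)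
    have hInv2 : ∀ (k : Nat) (hk : k < d.length), d.length - 1 ≤ k →
        pvGetI (List.replicate dominos.length (-1)) (k : Int)
          = intStop d.length (blockStop d k hk) := by
      intro k hk hle
      have hbs : blockStop d k hk = d.length := by
        unfold blockStop
        rw [stopS_of_ge d (k + 1) _ (by omega)]
        omega
      rw [hbs]
      unfold intStop
      rw [if_pos rfl]
      exact pvGetI_replicate _ _ _ (by omega) (by rw [← hlen]; exact_mod_cast hk)
    have hInv3 : ∀ (k : Nat) (hk : k < d.length), k < d.length - 1 →
        pvGetI (List.replicate dominos.length 1) (d[k]'hk).2.2 = 1 := by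
      intro k hk _
      exact pvGetI_replicate _ _ _ (hidrange k hk).1
        (by rw [← hlen]; exact (hidrange k hk).2)
    have hA := Aouter d hmono hid hidrange (d.length - 1) hn1
      (List.replicate dominos.length 1) (List.replicate dominos.length (-1))
      (by simp [hlen]) (by simp [hlen]) hInv1 hInv2 hInv3
    have hcast : ((dominos.length : Int) - 2) = (((d.length - 1 : Nat) : Int) - 1) := by
      rw [← hlen]; omega
    have hfuel : dominos.length + 1 = d.length + 1 := by rw [hlen]
    rw [hcast, hfuel]
    -- elementwise equality
    apply List.ext_getElem (by rw [hA.1, hB.1])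
    intro a h1 h2
    have ha : a < d.length := by rw [← hA.1]; exact h1
    obtain ⟨k, hk, hkeq⟩ := hsurj a ha
    rw [getElem_eq_pvGetI _ a h1, getElem_eq_pvGetI _ a h2, ← hkeq,
      hA.2 k hk, hB.2.1 k hk (by omega)]

-- ===== VERDICT (by name: the statement is the Claim_ definition above) =====
theorem cf56E_spec : Claim_equal_cf56E := by
  unfold Claim_equal_cf56E Spec_cf56E
  intro dominos _
  exact cf56E_eq dominos
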